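-- pv_equiv track=rewrite | github.com/tyanzuq2811/multimodal_fall_detection | src/data_pipeline/upfall_csv.py | _axis_name
-- ===== SOURCE A (Python) =====
-- def _axis_name(raw: str) -> str:
--     s = (raw or "").strip().lower()
--     if s.startswith("x-axis"):
--         return "x"
--     if s.startswith("y-axis"):
--         return "y"
--     if s.startswith("z-axis"):
--         return "z"
--     if s == "":
--         return ""
--     out = "".join(ch if ch.isalnum() else "_" for ch in s)
--     while "__" in out:
--         out = out.replace("__", "_")
--     return out.strip("_")
-- ===== SOURCE B (Python) =====
-- def _axis_name(raw: str) -> str: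
--     s = (raw or "").strip().lower()
--     if s.startswith("x-axis"):
--         return "x"
--     if s.startswith("y-axis"):
--         return "y"
--     if s.startswith("z-axis"):
--         return "z"
--     if s == "":
--         return ""
--     buf = []
--     for ch in s:
--         if ch.isalnum():
--             buf.append(ch)
--         elif not buf or buf[-1] != "_":
--             buf.append("_")
--     return "".join(buf).strip("_")
-- ===== Notes on version B (the rewrite author's own statement) =====
-- stated objective: simpler
-- what changed: The build-full-string-then-repeatedly-replace-double-underscores-until-fixpoint collapse is replaced by a single left-to-right pass that appends alphanumeric chars and appends an underscore only when the last emitted char is not already one; the four prefix/empty branches are unchanged.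
import Mathlib
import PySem

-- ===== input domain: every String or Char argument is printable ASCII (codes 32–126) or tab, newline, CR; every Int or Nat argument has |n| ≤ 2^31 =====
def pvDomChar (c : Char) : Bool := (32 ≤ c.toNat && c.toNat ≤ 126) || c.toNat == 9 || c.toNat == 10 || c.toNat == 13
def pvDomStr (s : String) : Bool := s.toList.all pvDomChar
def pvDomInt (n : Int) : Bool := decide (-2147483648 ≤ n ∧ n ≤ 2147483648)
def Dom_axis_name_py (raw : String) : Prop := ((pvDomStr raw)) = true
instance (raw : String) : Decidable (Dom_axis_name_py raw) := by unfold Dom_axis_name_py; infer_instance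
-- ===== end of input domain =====

-- B replaces A's build-then-repeatedly-replace("__","_") collapse by a single left-to-right pass
-- with a last-emitted-char check (objective: simpler one-pass decomposition; same observable result).


-- ===== PORT A =====
-- Helpers cited by pvCollapse's termination proof: pvRep1 is one replace("__","_") pass,
-- pvHasDD is the '"__" in out' test, with lemmas connecting them to the PySem primitives.
def pvRep1 : List Char → List Char
  | [] => []
  | [c] => [c]
  | c :: d :: t => if c = '_' ∧ d = '_' then '_' :: pvRep1 t else c :: pvRep1 (d :: t)

def pvHasDD : List Char → Bool
  | c :: d :: t => (c == '_' && d == '_') || pvHasDD (d :: t)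
  | _ => false

theorem pvGo_eq (fuel : Nat) : ∀ (s acc : List Char), s.length ≤ fuel →
    PySem.Chars.replace.go ['_','_'] ['_'] fuel s acc = acc.reverse ++ pvRep1 s := by
  induction fuel with
  | zero => intro s acc h; simp at h; subst h; simp [PySem.Chars.replace.go, pvRep1]
  | succ f ih =>
    intro s acc h
    match s with
    | [] => simp [PySem.Chars.replace.go, pvRep1]
    | [c] =>
      rw [PySem.Chars.replace.go]
      simp [List.isPrefixOf]
      rw [ih [] (c :: acc) (by simp)]
      simp [pvRep1]
    | c :: d :: t =>
      rw [PySem.Chars.replace.go]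
      by_cases hc : c = '_' ∧ d = '_'
      · obtain ⟨hc, hd⟩ := hc; subst hc; subst hd
        simp [List.isPrefixOf]
        rw [ih t ('_' :: acc) (by simp at h ⊢; omega)]
        simp [pvRep1]
      · have : List.isPrefixOf ['_','_'] (c :: d :: t) = false := by
          simp [List.isPrefixOf]; intro h1 h2; exact hc ⟨h1.symm, h2.symm⟩
        rw [this, if_neg (by simp : ¬ (false = true))]
        rw [ih (d :: t) (c :: acc) (by simp at h ⊢; omega)]
        rw [pvRep1, if_neg hc]; simp

theorem pvReplace_eq (l : List Char) :
    PySem.Chars.replace l ['_','_'] ['_'] = pvRep1 l := by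
  rw [PySem.Chars.replace]
  rw [if_neg (by simp)]
  simpa using pvGo_eq l.length l [] le_rfl

theorem pvHasDD_iff : ∀ (l : List Char), pvHasDD l = true ↔ ['_','_'] <:+: l := by
  intro l
  induction l with
  | nil => simp [pvHasDD]
  | cons c t ih =>
    match t, ih with
    | [], _ =>
      constructor
      · intro h; simp [pvHasDD] at h
      · intro h; have := h.length_le; simp at this
    | d :: t', ih =>
      rw [List.infix_cons_iff, ← ih]
      constructor
      · intro h
        rw [pvHasDD] at h
        rcases Bool.or_eq_true_iff.mp h with h | h
        · left
          obtain ⟨h1, h2⟩ := Bool.and_eq_true_iff.mp h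
          simp at h1 h2; subst h1; subst h2
          exact ⟨t', rfl⟩
        · right; exact h
      · intro h
        rw [pvHasDD]
        rcases h with h | h
        · obtain ⟨r, hr⟩ := h
          cases hr
          simp
        · simp [h]

theorem pvIsIn_eq (l : List Char) : PySem.Chars.isIn ['_','_'] l = pvHasDD l := by
  rw [Bool.eq_iff_iff, PySem.Chars.isIn_iff_infix, pvHasDD_iff]

theorem pvRep1_len_aux : ∀ (l : List Char), (pvRep1 l).length ≤ l.length := by
  intro l
  induction l using pvRep1.induct with
  | case1 => simp [pvRep1]
  | case2 c => simp [pvRep1]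
  | case3 c d t hc ih => rw [pvRep1, if_pos hc]; simp only [List.length_cons]; omega
  | case4 c d t hc ih => rw [pvRep1, if_neg hc]; simp only [List.length_cons] at ih ⊢; omega

theorem pvRep1_len : ∀ {l : List Char}, pvHasDD l = true → (pvRep1 l).length < l.length := by
  intro l h
  induction l using pvRep1.induct with
  | case1 => simp [pvHasDD] at h
  | case2 c => simp [pvHasDD] at h
  | case3 c d t hc ih =>
    obtain ⟨h1, h2⟩ := hc; subst h1; subst h2
    rw [pvRep1, if_pos ⟨rfl, rfl⟩]
    simp only [List.length_cons]
    have := (pvRep1_len_aux t); omega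
  | case4 c d t hc ih =>
    rw [pvRep1, if_neg hc]
    have hdd : pvHasDD (d :: t) = true := by
      rw [pvHasDD] at h
      rcases Bool.or_eq_true_iff.mp h with h | h
      · exfalso; obtain ⟨h1, h2⟩ := Bool.and_eq_true_iff.mp h; simp at h1 h2; exact hc ⟨h1, h2⟩
      · exact h
    have := ih hdd
    simp only [List.length_cons] at this ⊢; omega

-- A's loop: while "__" in out: out = out.replace("__", "_")
def pvCollapse (out : List Char) : List Char :=
  if PySem.Chars.isIn ['_','_'] out then pvCollapse (PySem.Chars.replace out ['_','_'] ['_']) else out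
termination_by out.length
decreasing_by
  rename_i h
  rw [pvIsIn_eq] at h
  simpa [pvReplace_eq] using pvRep1_len h

-- ch if ch.isalnum() else "_"
def pvF (c : Char) : Char := if PySem.Chars.isalnum c then c else '_'

def axis_name_py (raw : String) : String :=
  let s := PySem.Str.lower (PySem.Str.strip raw)
  if PySem.Str.startswith s "x-axis" then "x"
  else if PySem.Str.startswith s "y-axis" then "y"
  else if PySem.Str.startswith s "z-axis" then "z"
  else if s = "" then ""
  else String.ofList (PySem.Chars.stripChars (pvCollapse (s.toList.map pvF)) ['_'])

-- ===== PORT B =====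
-- the loop body: append ch if alnum, else append '_' only if the last emitted char is not '_'
def pvStep (buf : List Char) (ch : Char) : List Char :=
  if PySem.Chars.isalnum ch then buf ++ [ch]
  else if buf.getLast? != some '_' then buf ++ ['_'] else buf

def axis_name_py_alt (raw : String) : String :=
  let s := PySem.Str.lower (PySem.Str.strip raw)
  if PySem.Str.startswith s "x-axis" then "x"
  else if PySem.Str.startswith s "y-axis" then "y"
  else if PySem.Str.startswith s "z-axis" then "z"
  else if s = "" then ""
  else String.ofList (PySem.Chars.stripChars (s.toList.foldl pvStep []) ['_'])

-- ===== PRECONDITION & SPEC =====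
def Spec_axis_name_py (raw : String) (out : String) : Prop := out = axis_name_py_alt raw
instance (raw : String) (out : String) : Decidable (Spec_axis_name_py raw out) := by unfold Spec_axis_name_py; infer_instance

-- ===== CLAIM (what is proved, stated in full; the proofs are below) =====
def Claim_equal_axis_name_py : Prop := ∀ (raw : String), Dom_axis_name_py raw → Spec_axis_name_py raw (axis_name_py raw)

-- ===== LEMMAS AND PROOFS =====
-- canonical form: collapse every run of '_' to a single '_'
def pvSqueeze : List Char → List Char
  | [] => []
  | [c] => [c]
  | c :: d :: t => if c = '_' ∧ d = '_' then pvSqueeze (d :: t) else c :: pvSqueeze (d :: t)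

theorem pvSqueeze_cons {c : Char} (hc : c ≠ '_') (t : List Char) :
    pvSqueeze (c :: t) = c :: pvSqueeze t := by
  match t with
  | [] => rfl
  | d :: t' => rw [pvSqueeze, if_neg (by rintro ⟨h1, _⟩; exact hc h1)]

theorem pvSqueeze_rep1 : ∀ (t : List Char) (c : Char),
    pvSqueeze (c :: pvRep1 t) = pvSqueeze (c :: t) := by
  intro t
  induction t using pvRep1.induct with
  | case1 => intro c; rfl
  | case2 d => intro c; rfl
  | case3 d e t' hc ih =>
    intro c
    obtain ⟨h1, h2⟩ := hc; subst h1; subst h2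
    rw [pvRep1, if_pos ⟨rfl, rfl⟩]
    by_cases hcu : c = '_'
    · subst hcu
      rw [pvSqueeze, if_pos ⟨rfl, rfl⟩, ih '_']
      rw [show pvSqueeze ('_'::'_'::'_'::t') = pvSqueeze ('_'::'_'::t') from by rw [pvSqueeze, if_pos ⟨rfl, rfl⟩]]
      rw [show pvSqueeze ('_'::'_'::t') = pvSqueeze ('_'::t') from by rw [pvSqueeze, if_pos ⟨rfl, rfl⟩]]
    · rw [pvSqueeze, if_neg (by rintro ⟨h1, _⟩; exact hcu h1), ih '_']
      rw [show pvSqueeze (c::'_'::'_'::t') = c :: pvSqueeze ('_'::'_'::t') from by rw [pvSqueeze, if_neg (by rintro ⟨h1, _⟩; exact hcu h1)]]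
      rw [show pvSqueeze ('_'::'_'::t') = pvSqueeze ('_'::t') from by rw [pvSqueeze, if_pos ⟨rfl, rfl⟩]]
  | case4 d e t' hc ih =>
    intro c
    rw [pvRep1, if_neg hc]
    by_cases hcd : c = '_' ∧ d = '_'
    · obtain ⟨h1, h2⟩ := hcd; subst h1; subst h2
      rw [pvSqueeze, if_pos ⟨rfl, rfl⟩, ih '_',
          show pvSqueeze ('_'::'_'::e::t') = pvSqueeze ('_'::e::t') from by rw [pvSqueeze, if_pos ⟨rfl, rfl⟩]]
    · rw [pvSqueeze, if_neg hcd, ih d,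
          show pvSqueeze (c::d::e::t') = c :: pvSqueeze (d::e::t') from by rw [pvSqueeze, if_neg hcd]]

theorem pvSqueeze_noDD : ∀ {l : List Char}, pvHasDD l = false → pvSqueeze l = l := by
  intro l
  induction l using pvSqueeze.induct with
  | case1 => intro; rfl
  | case2 c => intro; rfl
  | case3 c d t hc ih =>
    intro h
    rw [pvHasDD] at h
    simp only [Bool.or_eq_false_iff] at h
    exfalso
    obtain ⟨h1, h2⟩ := hc; subst h1; subst h2
    simp at h
  | case4 c d t hc ih =>
    intro h
    rw [pvHasDD] at h
    simp only [Bool.or_eq_false_iff] at h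
    rw [pvSqueeze, if_neg hc, ih h.2]

theorem pvCollapse_eq_squeeze : ∀ (l : List Char), pvCollapse l = pvSqueeze l := by
  intro l
  induction l using pvCollapse.induct with
  | case1 l hcond ih =>
    rw [pvCollapse, if_pos hcond, ih, pvReplace_eq]
    have h : pvHasDD l = true := by rw [← pvIsIn_eq]; exact hcond
    match l, h with
    | c :: d :: t, h =>
      by_cases hcd : c = '_' ∧ d = '_'
      · obtain ⟨h1, h2⟩ := hcd; subst h1; subst h2
        rw [pvRep1, if_pos ⟨rfl, rfl⟩, pvSqueeze_rep1 t '_',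
            show pvSqueeze ('_'::'_'::t) = pvSqueeze ('_'::t) from by rw [pvSqueeze, if_pos ⟨rfl, rfl⟩]]
      · rw [pvRep1, if_neg hcd, pvSqueeze_rep1 (d::t) c]
  | case2 l hcond =>
    rw [pvCollapse, if_neg (by simpa using hcond)]
    exact (pvSqueeze_noDD (by rw [← pvIsIn_eq]; simpa using hcond)).symm

-- B's pass on the mapped characters, parameterised by the last-was-'_' flag
def pvH : Bool → List Char → List Char
  | _, [] => []
  | b, c :: t => if c = '_' then (if b then pvH true t else '_' :: pvH true t) else c :: pvH false t

theorem pvH_squeeze : ∀ (t : List Char),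
    pvH false t = pvSqueeze t ∧ '_' :: pvH true t = pvSqueeze ('_' :: t) := by
  intro t
  induction t with
  | nil => exact ⟨rfl, rfl⟩
  | cons c t' ih =>
    by_cases hc : c = '_'
    · subst hc
      constructor
      · rw [pvH, if_pos rfl, if_neg (by simp)]
        exact ih.2
      · rw [pvH, if_pos rfl, if_pos rfl,
            show pvSqueeze ('_'::'_'::t') = pvSqueeze ('_'::t') from by rw [pvSqueeze, if_pos ⟨rfl, rfl⟩]]
        exact ih.2
    · constructor
      · rw [pvH, if_neg hc, pvSqueeze_cons hc, ih.1]
      · rw [pvH, if_neg hc,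
            show pvSqueeze ('_'::c::t') = '_' :: pvSqueeze (c::t') from by
              rw [pvSqueeze, if_neg (by rintro ⟨_, h2⟩; exact hc h2)],
            pvSqueeze_cons hc, ih.1]

theorem pv_alnum_ne (c : Char) (h : PySem.Chars.isalnum c = true) : c ≠ '_' := by
  intro hc; subst hc; revert h; decide

theorem pvFoldl_eq_H : ∀ (l buf : List Char),
    l.foldl pvStep buf = buf ++ pvH (buf.getLast? == some '_') (l.map pvF) := by
  intro l
  induction l with
  | nil => intro buf; simp [pvH]
  | cons c t ih =>
    intro buf
    rw [List.foldl_cons, List.map_cons, ih]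
    by_cases ha : PySem.Chars.isalnum c = true
    · rw [show pvStep buf c = buf ++ [c] from by rw [pvStep, if_pos ha]]
      rw [pvH, if_neg (by simpa [pvF, ha] using pv_alnum_ne c ha)]
      have hb : (c == '_') = false := by simpa using pv_alnum_ne c ha
      simp [pvF, ha, hb]
    · have hf : pvF c = '_' := by rw [pvF, if_neg ha]
      rw [hf]
      by_cases hl : buf.getLast? = some '_'
      · rw [show pvStep buf c = buf from by rw [pvStep, if_neg ha, if_neg (by simp [hl])]]
        rw [pvH, if_pos rfl, if_pos (by simp [hl])]
        simp [hl]
      · rw [show pvStep buf c = buf ++ ['_'] from by rw [pvStep, if_neg ha, if_pos (by simpa using hl)]]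
        rw [pvH, if_pos rfl, if_neg (by simpa using hl)]
        simp

theorem pvCore (l : List Char) : pvCollapse (l.map pvF) = l.foldl pvStep [] := by
  rw [pvFoldl_eq_H, pvCollapse_eq_squeeze]
  simpa using (pvH_squeeze (l.map pvF)).1.symm

-- ===== VERDICT (by name: the statement is the Claim_ definition above) =====
theorem axis_name_py_spec : Claim_equal_axis_name_py := by
  intro raw _
  unfold Spec_axis_name_py axis_name_py axis_name_py_alt
  simp only [pvCore]
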